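-- pv_equiv track=rewrite | github.com/Ckk3/adventofcode2023 | day4/part1.py | calculate_card_points
-- ===== SOURCE A (Python) =====
-- def calculate_card_points(winning_numbers, numbers_i_have):
--     total_numbers_quant = 0
--     for number in numbers_i_have:
--         if number in winning_numbers:
--             if total_numbers_quant == 0:
--                 total_numbers_quant = 1
--                 continue
--             total_numbers_quant *= 2
--
--     return total_numbers_quant
-- ===== SOURCE B (Python) =====
-- def calculate_card_points(winning_numbers, numbers_i_have):
--     count = sum(1 for n in numbers_i_have if n in winning_numbers)
--     return 0 if count == 0 else 2 ** (count - 1)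
-- ===== Notes on version B (the rewrite author's own statement) =====
-- stated objective: simpler
-- what changed: Replaces the stepwise first-match/double-thereafter accumulator with a one-pass match count followed by the closed form 0 if count==0 else 2**(count-1).
import Mathlib
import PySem

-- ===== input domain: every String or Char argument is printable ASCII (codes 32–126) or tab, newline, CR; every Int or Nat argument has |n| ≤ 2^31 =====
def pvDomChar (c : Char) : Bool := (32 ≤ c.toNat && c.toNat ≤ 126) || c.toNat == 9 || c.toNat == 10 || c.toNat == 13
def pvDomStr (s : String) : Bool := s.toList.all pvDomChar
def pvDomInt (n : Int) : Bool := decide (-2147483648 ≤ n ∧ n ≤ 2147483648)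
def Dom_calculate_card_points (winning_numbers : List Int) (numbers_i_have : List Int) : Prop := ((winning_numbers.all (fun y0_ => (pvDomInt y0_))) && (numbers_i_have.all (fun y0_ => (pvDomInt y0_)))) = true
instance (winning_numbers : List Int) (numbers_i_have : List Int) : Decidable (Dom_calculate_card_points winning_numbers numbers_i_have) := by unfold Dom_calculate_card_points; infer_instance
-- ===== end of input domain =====

-- B replaces A's first-match/double-thereafter accumulator with a match count plus the
-- closed form 0/2^(count-1); objective: simpler.

-- ===== PORT A =====
-- A's loop: accumulator starts at 0; on a match it becomes 1 if it was 0, else doubles.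
def calculate_card_points (winning_numbers : List Int) (numbers_i_have : List Int) : Int :=
  numbers_i_have.foldl
    (fun total_numbers_quant number =>
      if number ∈ winning_numbers then
        if total_numbers_quant = 0 then 1 else total_numbers_quant * 2
      else total_numbers_quant)
    0

-- ===== PORT B =====
-- B: one counting pass, then the closed form.
def calculate_card_points_alt (winning_numbers : List Int) (numbers_i_have : List Int) : Int :=
  let count : Nat :=
    numbers_i_have.foldl (fun c n => if n ∈ winning_numbers then c + 1 else c) 0
  if count = 0 then 0 else 2 ^ (count - 1)

-- ===== PRECONDITION & SPEC =====
def Spec_calculate_card_points (winning_numbers : List Int) (numbers_i_have : List Int) (out : Int) : Prop := out = calculate_card_points_alt winning_numbers numbers_i_have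
instance (winning_numbers : List Int) (numbers_i_have : List Int) (out : Int) : Decidable (Spec_calculate_card_points winning_numbers numbers_i_have out) := by unfold Spec_calculate_card_points; infer_instance

-- ===== CLAIM (what is proved, stated in full; the proofs are below) =====
def Claim_equal_calculate_card_points : Prop := ∀ (winning_numbers : List Int) (numbers_i_have : List Int), Dom_calculate_card_points winning_numbers numbers_i_have → Spec_calculate_card_points winning_numbers numbers_i_have (calculate_card_points winning_numbers numbers_i_have)

-- ===== LEMMAS AND PROOFS =====

-- Invariant: starting A's fold from the closed form of c keeps the closed form of
-- c + (number of matches), and B's counting fold from c yields that total.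
theorem pv_fold_inv (w : List Int) (xs : List Int) (c : Nat) :
    xs.foldl
      (fun a n => if n ∈ w then (if a = 0 then (1 : Int) else a * 2) else a)
      (if c = 0 then 0 else 2 ^ (c - 1))
    = (if (xs.foldl (fun k n => if n ∈ w then k + 1 else k) c) = 0 then (0 : Int)
       else 2 ^ ((xs.foldl (fun k n => if n ∈ w then k + 1 else k) c) - 1)) := by
  induction xs generalizing c with
  | nil => simp
  | cons x xs ih =>
    simp only [List.foldl_cons]
    by_cases hx : x ∈ w
    · simp only [hx, if_pos]
      rcases Nat.eq_zero_or_pos c with h0 | h0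
      · simpa [h0] using ih 1
      · have hne : c ≠ 0 := Nat.pos_iff_ne_zero.mp h0
        have hpow : (2 : Int) ^ (c - 1) ≠ 0 := by positivity
        have hstep : (if (if c = 0 then (0 : Int) else 2 ^ (c - 1)) = 0 then (1 : Int)
            else (if c = 0 then (0 : Int) else 2 ^ (c - 1)) * 2)
            = (if c + 1 = 0 then (0 : Int) else 2 ^ (c + 1 - 1)) := by
          rw [if_neg hne, if_neg hpow, if_neg (Nat.succ_ne_zero c)]
          rw [Nat.add_sub_cancel]
          rw [← pow_succ]
          congr 1
          omega
        rw [hstep]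
        exact ih (c + 1)
    · simp only [hx, if_false]
      exact ih c

-- ===== VERDICT (by name: the statement is the Claim_ definition above) =====
theorem calculate_card_points_spec : Claim_equal_calculate_card_points := by
  intro w h _
  unfold Spec_calculate_card_points calculate_card_points calculate_card_points_alt
  simpa using pv_fold_inv w h 0
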